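-- pv_equiv track=rewrite | github.com/myselfjoraj/midway-search | search_by_for_loop.py | search
-- ===== SOURCE A (Python) =====
-- def search(element, array):
--     size = len(array)
--     mid = size // 2
--
--     for i in range(size):
--
--         f_ward = mid + i
--         b_ward = mid - i
--
--         if f_ward < size and array[f_ward] == element:
--             return f_ward
--
--         elif b_ward > -1 and array[b_ward] == element:
--             return b_ward
--
--     return -2
-- ===== SOURCE B (Python) =====
-- def search(element, array):
--     mid = len(array) // 2
--     front = array[mid:]
--     back = array[:mid + 1][::-1]
--     try:
--         i_f = front.index(element)
--     except ValueError:
--         i_f = None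
--     try:
--         i_b = back.index(element)
--     except ValueError:
--         i_b = None
--     if i_f is None and i_b is None:
--         return -2
--     if i_b is None or (i_f is not None and i_f <= i_b):
--         return mid + i_f
--     return mid - i_b
-- ===== Notes on version B (the rewrite author's own statement) =====
-- stated objective: alternative
-- what changed: B replaces A's outward index-probing loop entirely: it slices the array into the front part array[mid:] and the reversed prefix array[:mid+1][::-1], takes the first occurrence of the element in each with list.index, and combines the two offsets with one tie-break comparison (forward wins on equal distance), so there is no loop over probe indices at all.
import Mathlib
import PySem

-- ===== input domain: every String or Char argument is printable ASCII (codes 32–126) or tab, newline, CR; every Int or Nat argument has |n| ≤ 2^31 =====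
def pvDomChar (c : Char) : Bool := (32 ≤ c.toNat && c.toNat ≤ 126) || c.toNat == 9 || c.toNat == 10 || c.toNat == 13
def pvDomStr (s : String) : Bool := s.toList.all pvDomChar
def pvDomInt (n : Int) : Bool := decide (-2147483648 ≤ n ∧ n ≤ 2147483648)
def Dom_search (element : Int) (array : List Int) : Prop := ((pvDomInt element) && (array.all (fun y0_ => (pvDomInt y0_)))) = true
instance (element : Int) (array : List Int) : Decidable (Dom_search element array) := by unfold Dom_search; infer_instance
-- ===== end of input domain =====

-- B replaces A's outward probing loop by two library first-occurrence searches (on the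
-- front slice and on the reversed prefix) combined by one tie-break comparison; objective: alternative.

-- ===== PORT A =====
-- one step per loop iteration i: check f_ward, then b_ward, else continue
def searchGo (element : Int) (array : List Int) (size mid : Int) : List Int → Int
  | [] => -2
  | i :: rest =>
    let f := mid + i
    let b := mid - i
    if f < size && (PySem.List.pyGet? array f == some element) then f
    else if b > -1 && (PySem.List.pyGet? array b == some element) then b
    else searchGo element array size mid rest

def search (element : Int) (array : List Int) : Int :=
  let size : Int := array.length
  let mid : Int := PySem.Int.floordiv size 2
  searchGo element array size mid (PySem.List.pyRange 0 size 1)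

-- ===== PORT B =====
-- front = array[mid:], back = array[:mid+1][::-1]; i_f/i_b = first occurrence in each (none = ValueError)
def search_alt (element : Int) (array : List Int) : Int :=
  let mid : Int := PySem.Int.floordiv (array.length : Int) 2
  let front : List Int := PySem.List.slice array (some mid) none
  let back : List Int := (PySem.List.slice array none (some (mid + 1))).reverse
  let i_f := PySem.List.index? front element
  let i_b := PySem.List.index? back element
  match i_f, i_b with
  | none, none => -2
  | some a, none => mid + a
  | some a, some b => if a ≤ b then mid + (a : Int) else mid - (b : Int)
  | none, some b => mid - b

-- ===== PRECONDITION & SPEC =====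
def Spec_search (element : Int) (array : List Int) (out : Int) : Prop := out = search_alt element array
instance (element : Int) (array : List Int) (out : Int) : Decidable (Spec_search element array out) := by unfold Spec_search; infer_instance

-- ===== CLAIM (what is proved, stated in full; the proofs are below) =====
def Claim_equal_search : Prop := ∀ (element : Int) (array : List Int), Dom_search element array → Spec_search element array (search element array)

-- ===== LEMMAS AND PROOFS =====

-- value B computes from step i onward (proof-side characterisation of the remaining search)
def combineAt (element : Int) (mid : Nat) (F Bk : List Int) (i : Nat) : Int :=
  match PySem.List.index? (F.drop i) element, PySem.List.index? (Bk.drop i) element with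
  | none, none => -2
  | some a, none => (mid : Int) + i + a
  | some a, some b => if a ≤ b then (mid : Int) + i + a else (mid : Int) - i - b
  | none, some b => (mid : Int) - i - b

-- past the end of the loop: range empty, both remaining segments empty
theorem combineAt_base (element : Int) (array : List Int) (mid i : Nat)
    (_hmid : mid < array.length) (h : array.length ≤ i) :
    searchGo element array (array.length : Int) (mid : Int)
        (PySem.List.pyRange (i : Int) (array.length : Int) 1)
      = combineAt element mid (array.drop mid) ((array.take (mid + 1)).reverse) i := by
  rw [PySem.List.pyRange_one_eq_nil (by exact_mod_cast h)]
  have hF : (array.drop mid).drop i = [] := List.drop_eq_nil_of_le (by simp; omega)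
  have hB : ((array.take (mid + 1)).reverse).drop i = [] :=
    List.drop_eq_nil_of_le (by simp; omega)
  unfold searchGo combineAt
  rw [hF, hB]
  simp [PySem.List.index?_eq_idxOf?]

-- head of the forward segment at step i
theorem Fdrop_cons (array : List Int) (mid i : Nat) (hfw : mid + i < array.length) :
    (array.drop mid).drop i = array[mid + i]'hfw :: (array.drop mid).drop (i + 1) := by
  rw [List.drop_eq_getElem_cons (show i < (array.drop mid).length by simp; omega)]
  simp [List.getElem_drop]

-- head of the backward segment at step i
theorem Bdrop_cons (array : List Int) (mid i : Nat) (hmid : mid < array.length) (hbw : i ≤ mid) :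
    ((array.take (mid + 1)).reverse).drop i
      = array[mid - i]'(by omega) :: ((array.take (mid + 1)).reverse).drop (i + 1) := by
  have hiB : i < ((array.take (mid + 1)).reverse).length := by simp; omega
  rw [List.drop_eq_getElem_cons hiB]
  have hq : (((array.take (mid + 1)).reverse))[i]? = some (array[mid - i]'(by omega)) := by
    rw [List.getElem?_reverse (by simp; omega), List.getElem?_take]
    have hidx : (array.take (mid + 1)).length - 1 - i = mid - i := by simp; omega
    rw [hidx, if_pos (by omega), List.getElem?_eq_getElem (by omega)]
  rw [List.getElem?_eq_getElem hiB] at hq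
  rw [Option.some.inj hq]

theorem searchGo_eq_combineAt (element : Int) (array : List Int) (mid : Nat)
    (hmid : mid < array.length) :
    ∀ (k i : Nat), array.length - i ≤ k →
      searchGo element array (array.length : Int) (mid : Int)
          (PySem.List.pyRange (i : Int) (array.length : Int) 1)
        = combineAt element mid (array.drop mid) ((array.take (mid + 1)).reverse) i := by
  intro k
  induction k with
  | zero =>
    intro i h
    exact combineAt_base element array mid i hmid (by omega)
  | succ k ih =>
    intro i h
    by_cases hi : i < array.length
    case neg => exact combineAt_base element array mid i hmid (by omega)
    case pos =>
    rw [PySem.List.pyRange_one_cons (show (i : Int) < (array.length : Int) by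
      exact_mod_cast hi)]
    have hstep : ((i : Int) + 1) = ((i + 1 : Nat) : Int) := by push_cast; ring
    rw [hstep]
    have IH := ih (i + 1) (by omega)
    have hcastF : ((mid : Int) + (i : Int)) = ((mid + i : Nat) : Int) := by push_cast; ring
    show (if _ then _ else _) = _
    split_ifs with h1 h2
    · -- forward probe hits
      simp only [Bool.and_eq_true, decide_eq_true_eq, beq_iff_eq] at h1
      have hfw : mid + i < array.length := by exact_mod_cast h1.1
      have hval : array[mid + i]? = some element := by
        rw [← PySem.List.pyGet?_natCast, ← hcastF]; exact h1.2
      rw [List.getElem?_eq_getElem hfw] at hval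
      have heqF : array[mid + i]'hfw = element := by simpa using hval
      unfold combineAt
      rw [Fdrop_cons array mid i hfw, heqF, PySem.List.index?_cons_self]
      cases PySem.List.index? (((array.take (mid + 1)).reverse).drop i) element <;> simp
    · -- backward probe hits
      simp only [Bool.and_eq_true, decide_eq_true_eq, beq_iff_eq] at h1 h2
      have hbw : i ≤ mid := by have := h2.1; omega
      have hcastB : ((mid : Int) - (i : Int)) = ((mid - i : Nat) : Int) := by omega
      have hval : array[mid - i]? = some element := by
        rw [← PySem.List.pyGet?_natCast, ← hcastB]; exact h2.2
      rw [List.getElem?_eq_getElem (by omega)] at hval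
      have heqB : array[mid - i]'(by omega) = element := by simpa using hval
      unfold combineAt
      rw [Bdrop_cons array mid i hmid hbw, heqB, PySem.List.index?_cons_self]
      by_cases hfw : mid + i < array.length
      · have hneF : array[mid + i]'hfw ≠ element := by
          intro hE
          exact h1 ⟨by exact_mod_cast hfw, by
            rw [hcastF, PySem.List.pyGet?_natCast, List.getElem?_eq_getElem hfw, hE]⟩
        rw [Fdrop_cons array mid i hfw, PySem.List.index?_cons_of_ne _ hneF]
        cases PySem.List.index? ((array.drop mid).drop (i + 1)) element <;> simp
      · have hFe : (array.drop mid).drop i = [] := List.drop_eq_nil_of_le (by simp; omega)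
        rw [hFe]
        simp [PySem.List.index?_eq_idxOf?]
    · -- no hit at step i: recurse
      simp only [Bool.and_eq_true, decide_eq_true_eq, beq_iff_eq] at h1 h2
      rw [IH]
      unfold combineAt
      by_cases hfw : mid + i < array.length
      · have hneF : array[mid + i]'hfw ≠ element := by
          intro hE
          exact h1 ⟨by exact_mod_cast hfw, by
            rw [hcastF, PySem.List.pyGet?_natCast, List.getElem?_eq_getElem hfw, hE]⟩
        rw [Fdrop_cons array mid i hfw, PySem.List.index?_cons_of_ne _ hneF]
        by_cases hbw : i ≤ mid
        · have hneB : array[mid - i]'(by omega) ≠ element := by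
            intro hE
            refine h2 ⟨by omega, ?_⟩
            have hcastB : ((mid : Int) - (i : Int)) = ((mid - i : Nat) : Int) := by omega
            rw [hcastB, PySem.List.pyGet?_natCast, List.getElem?_eq_getElem (by omega), hE]
          rw [Bdrop_cons array mid i hmid hbw, PySem.List.index?_cons_of_ne _ hneB]
          cases PySem.List.index? ((array.drop mid).drop (i + 1)) element <;>
            cases PySem.List.index? (((array.take (mid + 1)).reverse).drop (i + 1)) element <;>
            simp
          all_goals try split_ifs
          all_goals omega
        · have hBe : ((array.take (mid + 1)).reverse).drop i = [] :=
            List.drop_eq_nil_of_le (by simp; omega)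
          have hBe' : ((array.take (mid + 1)).reverse).drop (i + 1) = [] :=
            List.drop_eq_nil_of_le (by simp; omega)
          rw [hBe, hBe']
          cases PySem.List.index? ((array.drop mid).drop (i + 1)) element <;>
            simp [PySem.List.index?_eq_idxOf?]
          all_goals omega
      · have hFe : (array.drop mid).drop i = [] := List.drop_eq_nil_of_le (by simp; omega)
        have hFe' : (array.drop mid).drop (i + 1) = [] := List.drop_eq_nil_of_le (by simp; omega)
        rw [hFe, hFe']
        by_cases hbw : i ≤ mid
        · have hneB : array[mid - i]'(by omega) ≠ element := by
            intro hE
            refine h2 ⟨by omega, ?_⟩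
            have hcastB : ((mid : Int) - (i : Int)) = ((mid - i : Nat) : Int) := by omega
            rw [hcastB, PySem.List.pyGet?_natCast, List.getElem?_eq_getElem (by omega), hE]
          rw [Bdrop_cons array mid i hmid hbw, PySem.List.index?_cons_of_ne _ hneB]
          cases PySem.List.index? (((array.take (mid + 1)).reverse).drop (i + 1)) element <;>
            simp [PySem.List.index?_eq_idxOf?]
          all_goals omega
        · have hBe : ((array.take (mid + 1)).reverse).drop i = [] :=
            List.drop_eq_nil_of_le (by simp; omega)
          have hBe' : ((array.take (mid + 1)).reverse).drop (i + 1) = [] :=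
            List.drop_eq_nil_of_le (by simp; omega)
          rw [hBe, hBe']
          simp [PySem.List.index?_eq_idxOf?]

theorem search_alt_eq_combineAt (element : Int) (array : List Int) :
    search_alt element array
      = combineAt element (array.length / 2) (array.drop (array.length / 2))
          ((array.take (array.length / 2 + 1)).reverse) 0 := by
  unfold search_alt combineAt
  have hfd : PySem.Int.floordiv (array.length : Int) 2 = ((array.length / 2 : Nat) : Int) := by
    exact_mod_cast PySem.Int.floordiv_natCast array.length 2
  rw [hfd]
  have h1 : PySem.List.slice array (some ((array.length / 2 : Nat) : Int)) none
      = array.drop (array.length / 2) := PySem.List.slice_from_natCast array (array.length / 2)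
  have h2 : PySem.List.slice array none (some (((array.length / 2 : Nat) : Int) + 1))
      = array.take (array.length / 2 + 1) := by
    have h := PySem.List.slice_to_natCast array (array.length / 2 + 1)
    push_cast at h
    exact h
  dsimp only
  rw [h1, h2]
  simp only [List.drop_zero]
  cases PySem.List.index? (array.drop (array.length / 2)) element <;>
    cases PySem.List.index? (array.take (array.length / 2 + 1)).reverse element <;>
    simp

-- ===== VERDICT (by name: the statement is the Claim_ definition above) =====
theorem search_spec : Claim_equal_search := by
  intro element array _
  unfold Spec_search
  rcases eq_or_ne array [] with rfl | hne
  · rfl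
  · have hlen : 0 < array.length := List.length_pos_of_ne_nil hne
    have hmid : array.length / 2 < array.length := Nat.div_lt_self hlen (by omega)
    rw [search_alt_eq_combineAt element array]
    show searchGo element array (array.length : Int) _ _ = _
    have hfd : PySem.Int.floordiv (array.length : Int) 2 = ((array.length / 2 : Nat) : Int) := by
      exact_mod_cast PySem.Int.floordiv_natCast array.length 2
    rw [hfd]
    have := searchGo_eq_combineAt element array (array.length / 2) hmid array.length 0 (by omega)
    simpa using this
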